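-- pv_equiv track=rewrite | github.com/kodze8/3d-rendering | initial_work/black_.py | line_coordinates
-- ===== SOURCE A (Python) =====
-- def line_coordinates(cube):
--     lines = set()
--     for x in cube:
--         for y in cube:
--             if x != y:
--                 diff = sum(1 for i in range(3) if x[i] != y[i])
--                 if diff == 1:
--                     line = tuple(sorted((tuple(x), tuple(y))))
--                     lines.add(line)
--     return lines
-- ===== SOURCE B (Python) =====
-- def line_coordinates(cube):
--     lines = set()
--     rest = list(cube)
--     while rest:
--         x = rest.pop(0)
--         for y in rest:
--             d = (x[0] != y[0]) + (x[1] != y[1]) + (x[2] != y[2])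
--             if d == 1:
--                 lines.add((x, y) if x < y else (y, x))
--     return lines
-- ===== Notes on version B (the rewrite author's own statement) =====
-- stated objective: faster
-- what changed: B visits each unordered pair of points once (popping the front and comparing only against the remaining points) and counts coordinate mismatches with direct boolean arithmetic and a min/max pick, instead of A's full n-by-n scan over all ordered pairs with a generator-sum diff and sorted().
import Mathlib
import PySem

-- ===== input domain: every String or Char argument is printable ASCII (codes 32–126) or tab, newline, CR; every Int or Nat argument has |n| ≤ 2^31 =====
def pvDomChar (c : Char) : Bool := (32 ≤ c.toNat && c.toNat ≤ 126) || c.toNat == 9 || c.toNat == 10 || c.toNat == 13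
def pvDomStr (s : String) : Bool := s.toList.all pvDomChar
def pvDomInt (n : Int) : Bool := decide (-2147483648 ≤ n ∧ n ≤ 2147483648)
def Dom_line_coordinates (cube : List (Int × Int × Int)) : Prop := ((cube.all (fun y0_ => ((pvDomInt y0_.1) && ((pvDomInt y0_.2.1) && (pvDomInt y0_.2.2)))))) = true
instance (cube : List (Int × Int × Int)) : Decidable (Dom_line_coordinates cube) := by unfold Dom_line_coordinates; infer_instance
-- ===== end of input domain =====

-- B scans each unordered pair once (each point against the points after it, popped front list)
-- instead of A's full n×n double scan with a generator sum; same returned set (proved equal as the same insertion-order list).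

-- ===== PORT A =====
-- Python x[i] on a 3-tuple, i ∈ range(3): exact by hand (i is always 0, 1 or 2 here).
def pvCoord (p : Int × Int × Int) (i : Int) : Int :=
  if i = 0 then p.1 else if i = 1 then p.2.1 else p.2.2

-- sum(1 for i in range(3) if x[i] != y[i])
def pvDiff (x y : Int × Int × Int) : Int :=
  (((PySem.List.pyRange 0 3 1).filter (fun i => pvCoord x i != pvCoord y i)).map (fun _ => (1 : Int))).sum

-- Python tuple '<' is lexicographic: exact by hand.
def pvTupLt (a b : Int × Int × Int) : Bool :=
  decide (a.1 < b.1) || (a.1 == b.1 && (decide (a.2.1 < b.2.1) || (a.2.1 == b.2.1 && decide (a.2.2 < b.2.2))))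

-- tuple(sorted((x, y))): stable sort of a two-element list, exact by hand.
def pvSortPair (x y : Int × Int × Int) : (Int × Int × Int) × (Int × Int × Int) :=
  if pvTupLt y x then (y, x) else (x, y)

def line_coordinates (cube : List (Int × Int × Int)) : List ((Int × Int × Int) × (Int × Int × Int)) :=
  cube.foldl (fun lines x =>
    cube.foldl (fun lines y =>
      if x ≠ y then
        if pvDiff x y = 1 then PySem.Set.add lines (pvSortPair x y) else lines
      else lines) lines) PySem.Set.empty

-- ===== PORT B =====
-- (x[0] != y[0]) + (x[1] != y[1]) + (x[2] != y[2]) == 1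
def pvD1 (x y : Int × Int × Int) : Bool :=
  ((if x.1 ≠ y.1 then (1 : Int) else 0) + (if x.2.1 ≠ y.2.1 then 1 else 0) +
    (if x.2.2 ≠ y.2.2 then 1 else 0)) == 1

-- (x, y) if x < y else (y, x)
def pvMinMax (x y : Int × Int × Int) : (Int × Int × Int) × (Int × Int × Int) :=
  if pvTupLt x y then (x, y) else (y, x)

-- while rest: x = rest.pop(0); for y in rest: …
def pvAltLoop : List (Int × Int × Int) → List ((Int × Int × Int) × (Int × Int × Int)) → List ((Int × Int × Int) × (Int × Int × Int))
  | [], lines => lines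
  | x :: rest, lines =>
      pvAltLoop rest (rest.foldl (fun lines y => if pvD1 x y then PySem.Set.add lines (pvMinMax x y) else lines) lines)

def line_coordinates_alt (cube : List (Int × Int × Int)) : List ((Int × Int × Int) × (Int × Int × Int)) :=
  pvAltLoop cube PySem.Set.empty

-- ===== PRECONDITION & SPEC =====
def Spec_line_coordinates (cube : List (Int × Int × Int)) (out : List ((Int × Int × Int) × (Int × Int × Int))) : Prop := out = line_coordinates_alt cube
instance (cube : List (Int × Int × Int)) (out : List ((Int × Int × Int) × (Int × Int × Int))) : Decidable (Spec_line_coordinates cube out) := by unfold Spec_line_coordinates; infer_instance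

-- ===== CLAIM (what is proved, stated in full; the proofs are below) =====
def Claim_equal_line_coordinates : Prop := ∀ (cube : List (Int × Int × Int)), Dom_line_coordinates cube → Spec_line_coordinates cube (line_coordinates cube)

-- ===== LEMMAS AND PROOFS =====

-- B's inner loop, named for the proofs.
def pvInner (x : Int × Int × Int) (L : List (Int × Int × Int))
    (s : List ((Int × Int × Int) × (Int × Int × Int))) : List ((Int × Int × Int) × (Int × Int × Int)) :=
  L.foldl (fun lines y => if pvD1 x y then PySem.Set.add lines (pvMinMax x y) else lines) s

lemma pvRange3 : PySem.List.pyRange 0 3 1 = [0, 1, 2] := by decide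

lemma pvTupLt_cases (x y : Int × Int × Int) :
    x = y ∨ (pvTupLt x y = true ∧ pvTupLt y x = false) ∨ (pvTupLt x y = false ∧ pvTupLt y x = true) := by
  obtain ⟨a1, a2, a3⟩ := x; obtain ⟨b1, b2, b3⟩ := y
  simp only [pvTupLt, Bool.or_eq_true, Bool.and_eq_true, decide_eq_true_eq, beq_iff_eq,
    Bool.or_eq_false_iff, Bool.and_eq_false_iff, decide_eq_false_iff_not, not_lt, beq_eq_false_iff_ne,
    ne_eq, Prod.mk.injEq]
  omega

lemma pvSortPair_eq_minMax (x y : Int × Int × Int) : pvSortPair x y = pvMinMax x y := by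
  rcases pvTupLt_cases x y with h | ⟨h1, h2⟩ | ⟨h1, h2⟩
  · subst h; unfold pvSortPair pvMinMax; cases pvTupLt x x <;> simp
  · simp [pvSortPair, pvMinMax, h1, h2]
  · simp [pvSortPair, pvMinMax, h1, h2]

lemma pvStep_eq (x y : Int × Int × Int) (s : List ((Int × Int × Int) × (Int × Int × Int))) :
    (if x ≠ y then if pvDiff x y = 1 then PySem.Set.add s (pvSortPair x y) else s else s)
      = (if pvD1 x y then PySem.Set.add s (pvMinMax x y) else s) := by
  obtain ⟨a1, a2, a3⟩ := x; obtain ⟨b1, b2, b3⟩ := y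
  by_cases h1 : a1 = b1 <;> by_cases h2 : a2 = b2 <;> by_cases h3 : a3 = b3 <;>
    simp [pvDiff, pvRange3, pvCoord, pvD1, h1, h2, h3, Prod.ext_iff, pvSortPair_eq_minMax]

lemma pvD1_self (x : Int × Int × Int) : pvD1 x x = false := by simp [pvD1]

lemma pvD1_symm (x y : Int × Int × Int) : pvD1 x y = pvD1 y x := by
  obtain ⟨a1, a2, a3⟩ := x; obtain ⟨b1, b2, b3⟩ := y
  by_cases h1 : a1 = b1 <;> by_cases h2 : a2 = b2 <;> by_cases h3 : a3 = b3 <;>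
    simp [pvD1, h1, h2, h3, eq_comm]

lemma pvMinMax_symm (x y : Int × Int × Int) : pvMinMax x y = pvMinMax y x := by
  rcases pvTupLt_cases x y with h | ⟨h1, h2⟩ | ⟨h1, h2⟩
  · subst h; rfl
  · simp [pvMinMax, h1, h2]
  · simp [pvMinMax, h1, h2]

lemma pvInner_mono (x : Int × Int × Int) (L : List (Int × Int × Int))
    (s : List ((Int × Int × Int) × (Int × Int × Int))) (a : (Int × Int × Int) × (Int × Int × Int))
    (h : a ∈ s) : a ∈ pvInner x L s := by
  induction L generalizing s with
  | nil => exact h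
  | cons y L ih =>
      simp only [pvInner, List.foldl_cons] at *
      apply ih
      split
      · exact (PySem.Set.mem_add _ _ _).mpr (Or.inl h)
      · exact h

lemma pvInner_adds (x y : Int × Int × Int) (L : List (Int × Int × Int))
    (s : List ((Int × Int × Int) × (Int × Int × Int))) (hy : y ∈ L) (hd : pvD1 x y = true) :
    pvMinMax x y ∈ pvInner x L s := by
  induction L generalizing s with
  | nil => cases hy
  | cons z L ih =>
      simp only [pvInner, List.foldl_cons] at *
      rcases List.mem_cons.mp hy with rfl | hy'
      · apply pvInner_mono
        rw [if_pos hd]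
        exact (PySem.Set.mem_add _ _ _).mpr (Or.inr rfl)
      · exact ih _ hy'

lemma pvInner_noop (x : Int × Int × Int) (L : List (Int × Int × Int))
    (s : List ((Int × Int × Int) × (Int × Int × Int)))
    (h : ∀ y ∈ L, pvD1 x y = true → pvMinMax x y ∈ s) : pvInner x L s = s := by
  induction L generalizing s with
  | nil => rfl
  | cons y L ih =>
      simp only [pvInner, List.foldl_cons] at *
      have hstep : (if pvD1 x y then PySem.Set.add s (pvMinMax x y) else s) = s := by
        split
        · exact PySem.Set.add_of_mem (h y (List.mem_cons_self ..) (by assumption))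
        · rfl
      rw [hstep]
      exact ih _ (fun z hz hd => h z (List.mem_cons_of_mem _ hz) hd)

-- The invariant: every line between an already-processed point and any point of the cube is in s.
lemma pvMain (suf : List (Int × Int × Int)) :
    ∀ (pre : List (Int × Int × Int)) (s : List ((Int × Int × Int) × (Int × Int × Int))),
    (∀ p ∈ pre, ∀ q ∈ pre ++ suf, pvD1 p q = true → pvMinMax p q ∈ s) →
    suf.foldl (fun lines x =>
      (pre ++ suf).foldl (fun lines y =>
        if x ≠ y then
          if pvDiff x y = 1 then PySem.Set.add lines (pvSortPair x y) else lines
        else lines) lines) s = pvAltLoop suf s := by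
  induction suf with
  | nil => intro pre s _; rfl
  | cons x suf ih =>
      intro pre s hInv
      have hfun : (fun lines y =>
          if x ≠ y then
            if pvDiff x y = 1 then PySem.Set.add lines (pvSortPair x y) else lines
          else lines)
          = (fun lines y => if pvD1 x y then PySem.Set.add lines (pvMinMax x y) else lines) := by
        funext lines y; exact pvStep_eq x y lines
      -- the first outer step: fold over pre ++ x :: suf collapses to pvInner x suf s
      have hfirst : (pre ++ x :: suf).foldl (fun lines y =>
          if x ≠ y then
            if pvDiff x y = 1 then PySem.Set.add lines (pvSortPair x y) else lines
          else lines) s = pvInner x suf s := by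
        rw [hfun]
        rw [List.foldl_append]
        have hpre : pre.foldl (fun lines y => if pvD1 x y then PySem.Set.add lines (pvMinMax x y) else lines) s = s := by
          apply pvInner_noop
          intro y hy hd
          rw [pvMinMax_symm]
          exact hInv y hy x (by simp) (by rw [← pvD1_symm]; exact hd)
        rw [hpre]
        simp [List.foldl_cons, pvD1_self, pvInner]
      rw [List.foldl_cons, hfirst]
      have hsplit : pre ++ x :: suf = (pre ++ [x]) ++ suf := by simp
      simp only [hsplit]
      rw [ih (pre ++ [x]) (pvInner x suf s) ?_]
      · rfl
      intro p hp q hq hd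
      rcases List.mem_append.mp hp with hp' | hp'
      · -- p was already processed
        apply pvInner_mono
        apply hInv p hp' q _ hd
        simpa using hq
      · -- p = x
        have hpx : p = x := by simpa using hp'
        subst hpx
        rcases List.mem_append.mp hq with hq' | hq'
        · rcases List.mem_append.mp hq' with hq'' | hq''
          · -- q ∈ pre: symmetric line already in s
            apply pvInner_mono
            rw [pvMinMax_symm]
            exact hInv q hq'' p (by simp) (by rw [← pvD1_symm]; exact hd)
          · -- q = p: pvD1 p p is false
            have : q = p := by simpa using hq''
            subst this
            rw [pvD1_self] at hd; cases hd
        · -- q ∈ suf: the inner loop just added it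
          exact pvInner_adds p q suf s hq' hd

-- ===== VERDICT (by name: the statement is the Claim_ definition above) =====
theorem line_coordinates_spec : Claim_equal_line_coordinates := by
  intro cube _
  show line_coordinates cube = line_coordinates_alt cube
  unfold line_coordinates line_coordinates_alt
  have := pvMain cube [] PySem.Set.empty (by simp)
  simpa using this
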